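-- pv_equiv track=rewrite | github.com/quanchaozhao/Tibetan | water_process_and_compare/water_three.py | alter_spilt
-- ===== SOURCE A (Python) =====
-- def alter_spilt(image, pointy_left, pointx_left):
--     flag = True
--     x1 = y1 = 0;
--     index = 0
--     for i in range(len(pointx_left)):
--         if (image[pointy_left[i]][pointx_left[i]] == 1):
--             index = index + 1
--             if (flag):
--                 flag = False
--                 x1 = pointx_left[i]
--                 y1 = pointy_left[i]
--         else:
--             if (index >= 2):
--                 return [[x1, y1, pointx_left[i - 1], pointy_left[i - 1]]]
--             else:
--                 flag = True
--                 index = 0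
--     return []
-- ===== SOURCE B (Python) =====
-- def alter_spilt(image, pointy_left, pointx_left):
--     n = len(pointx_left)
--     i = 0
--     while i < n:
--         if image[pointy_left[i]][pointx_left[i]] != 1:
--             i += 1
--             continue
--         # a run of foreground pixels starts at i; extend it to its end j
--         j = i
--         while j + 1 < n and image[pointy_left[j + 1]][pointx_left[j + 1]] == 1:
--             j += 1
--         if j - i >= 1 and j + 1 < n:
--             return [[pointx_left[i], pointy_left[i], pointx_left[j], pointy_left[j]]]
--         i = j + 1
--     return []
-- ===== Notes on version B (the rewrite author's own statement) =====
-- stated objective: alternative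
-- what changed: A's single pass with flag/index/x1/y1 state is replaced by a two-level decomposition: an outer loop finds a run start, an inner loop extends it to the run end, and the result is emitted from the run's endpoints.
-- outside the precondition, e.g. on alter_spilt([[1, 1, 0]], [0, 0, 0, 5], [0, 1, 2, 0]): A returns [[0, 0, 1, 0]], B returns [[0, 0, 1, 0]]
import Mathlib
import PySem

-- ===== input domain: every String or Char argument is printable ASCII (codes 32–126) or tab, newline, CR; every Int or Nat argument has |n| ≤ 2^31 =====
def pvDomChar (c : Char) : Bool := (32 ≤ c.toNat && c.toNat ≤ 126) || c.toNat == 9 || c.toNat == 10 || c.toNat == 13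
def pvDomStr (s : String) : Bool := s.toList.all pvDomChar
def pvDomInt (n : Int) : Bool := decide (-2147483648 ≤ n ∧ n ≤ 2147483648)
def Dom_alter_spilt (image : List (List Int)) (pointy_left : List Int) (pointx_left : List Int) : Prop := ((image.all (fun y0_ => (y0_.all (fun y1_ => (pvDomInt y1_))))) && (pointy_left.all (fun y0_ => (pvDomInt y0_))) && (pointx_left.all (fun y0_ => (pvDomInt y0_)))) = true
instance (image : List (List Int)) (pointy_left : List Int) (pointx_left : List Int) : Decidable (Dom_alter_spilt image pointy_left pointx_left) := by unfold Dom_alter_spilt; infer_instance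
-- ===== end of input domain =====

-- B replaces A's one-pass flag/index state machine by a two-level decomposition
-- (outer scan for a run start, inner extension to the run end); objective: alternative.


-- ===== PORT A =====
-- shared helper: the pixel image[pointy_left[i]][pointx_left[i]] (total via defaults; Pre_ makes every access in range)
def pvPix (image : List (List Int)) (py px : List Int) (i : Nat) : Int :=
  PySem.List.pyGetD
    (PySem.List.pyGetD image (PySem.List.pyGetD py (Int.ofNat i) 0) [])
    (PySem.List.pyGetD px (Int.ofNat i) 0) 0

-- A's loop: for i in range(n) with state (flag, x1, y1, index)
def pvGoA (image : List (List Int)) (py px : List Int) (n i : Nat)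
    (flag : Bool) (x1 y1 : Int) (index : Nat) : List (List Int) :=
  if _h : i < n then
    if pvPix image py px i = 1 then
      if flag then
        pvGoA image py px n (i+1) false
          (PySem.List.pyGetD px (Int.ofNat i) 0) (PySem.List.pyGetD py (Int.ofNat i) 0) (index+1)
      else
        pvGoA image py px n (i+1) flag x1 y1 (index+1)
    else
      if 2 ≤ index then
        [[x1, y1, PySem.List.pyGetD px (Int.ofNat i - 1) 0, PySem.List.pyGetD py (Int.ofNat i - 1) 0]]
      else
        pvGoA image py px n (i+1) true x1 y1 0
  else []
termination_by n - i
decreasing_by all_goals omega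

def alter_spilt (image : List (List Int)) (pointy_left : List Int) (pointx_left : List Int) : List (List Int) :=
  pvGoA image pointy_left pointx_left pointx_left.length 0 true 0 0 0

-- ===== PORT B =====
-- inner while: extend the run starting at j as long as the next pixel is foreground
def pvRunEnd (image : List (List Int)) (py px : List Int) (n j : Nat) : Nat :=
  if _h : j + 1 < n ∧ pvPix image py px (j+1) = 1 then
    pvRunEnd image py px n (j+1)
  else j
termination_by n - j
decreasing_by omega

-- termination helper for the outer loop (cited in decreasing_by)
theorem pvRunEnd_ge (image : List (List Int)) (py px : List Int) :
    ∀ d j, d = n - j → j ≤ pvRunEnd image py px n j := by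
  intro d
  induction d with
  | zero =>
    intro j hd
    rw [pvRunEnd]
    split
    · omega
    · omega
  | succ d ih =>
    intro j hd
    rw [pvRunEnd]
    split
    · rename_i h
      have := ih (j+1) (by omega)
      omega
    · omega

-- outer while over i
def pvGoB (image : List (List Int)) (py px : List Int) (n i : Nat) : List (List Int) :=
  if _h : i < n then
    if pvPix image py px i ≠ 1 then
      pvGoB image py px n (i+1)
    else
      let j := pvRunEnd image py px n i
      if 1 ≤ j - i ∧ j + 1 < n then
        [[PySem.List.pyGetD px (Int.ofNat i) 0, PySem.List.pyGetD py (Int.ofNat i) 0,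
          PySem.List.pyGetD px (Int.ofNat j) 0, PySem.List.pyGetD py (Int.ofNat j) 0]]
      else
        pvGoB image py px n (j+1)
  else []
termination_by n - i
decreasing_by
  · omega
  · have := pvRunEnd_ge image py px (n - i) i rfl
    omega

def alter_spilt_alt (image : List (List Int)) (pointy_left : List Int) (pointx_left : List Int) : List (List Int) :=
  pvGoB image pointy_left pointx_left pointx_left.length 0

-- ===== PRECONDITION & SPEC =====
-- Pre_ admits the inputs on which every index access of the loop is valid; this is slightly
-- narrower than A's domain (A can return early, before ever reaching a later invalid index) — see cites.
def Pre_alter_spilt (image : List (List Int)) (pointy_left : List Int) (pointx_left : List Int) : Prop :=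
  pointx_left.length ≤ pointy_left.length ∧
  ∀ i : Nat, i < pointx_left.length →
    PySem.Raise.InRange image.length (pointy_left.getD i 0) ∧
    PySem.Raise.InRange (PySem.List.pyGetD image (pointy_left.getD i 0) []).length (pointx_left.getD i 0)

instance (image : List (List Int)) (pointy_left : List Int) (pointx_left : List Int) : Decidable (Pre_alter_spilt image pointy_left pointx_left) := by unfold Pre_alter_spilt; infer_instance

def pvWitness_alter_spilt : List (List Int) × List Int × List Int :=
  ([[1, 1, 0]], [0, 0, 0], [0, 1, 2])

def Spec_alter_spilt (image : List (List Int)) (pointy_left : List Int) (pointx_left : List Int) (out : List (List Int)) : Prop := out = alter_spilt_alt image pointy_left pointx_left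
instance (image : List (List Int)) (pointy_left : List Int) (pointx_left : List Int) (out : List (List Int)) : Decidable (Spec_alter_spilt image pointy_left pointx_left out) := by unfold Spec_alter_spilt; infer_instance

-- ===== CLAIM (what is proved, stated in full; the proofs are below) =====
def Claim_equal_alter_spilt : Prop := ∀ (image : List (List Int)) (pointy_left : List Int) (pointx_left : List Int), Dom_alter_spilt image pointy_left pointx_left → Pre_alter_spilt image pointy_left pointx_left → Spec_alter_spilt image pointy_left pointx_left (alter_spilt image pointy_left pointx_left)

-- ===== LEMMAS AND PROOFS =====

theorem pvRunEnd_stop (image : List (List Int)) (py px : List Int) (n j : Nat)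
    (h : ¬ (j + 1 < n ∧ pvPix image py px (j+1) = 1)) :
    pvRunEnd image py px n j = j := by
  rw [pvRunEnd]; simp [h]

theorem pvRunEnd_step (image : List (List Int)) (py px : List Int) (n j : Nat)
    (h : j + 1 < n ∧ pvPix image py px (j+1) = 1) :
    pvRunEnd image py px n j = pvRunEnd image py px n (j+1) := by
  rw [pvRunEnd]; simp [h]

-- mid-run characterisation of A's loop: at position i with flag=False and index = i - s (run started at s)
theorem pvGoA_mid (image : List (List Int)) (py px : List Int) (n : Nat) :
    ∀ d i s (x1 y1 : Int), d = n - i → s < i → i ≤ n →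
      pvGoA image py px n i false x1 y1 (i - s) =
        (if pvRunEnd image py px n (i-1) + 1 < n then
           if 1 ≤ pvRunEnd image py px n (i-1) - s then
             [[x1, y1, PySem.List.pyGetD px (Int.ofNat (pvRunEnd image py px n (i-1))) 0,
               PySem.List.pyGetD py (Int.ofNat (pvRunEnd image py px n (i-1))) 0]]
           else pvGoA image py px n (pvRunEnd image py px n (i-1) + 2) true x1 y1 0
         else []) := by
  intro d
  induction d with
  | zero =>
    intro i s x1 y1 hd hs hn
    have hi : i = n := by omega
    rw [pvGoA]
    have hstop : pvRunEnd image py px n (i-1) = i - 1 :=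
      pvRunEnd_stop image py px n (i-1) (by omega)
    simp only [hstop]
    have : ¬ i < n := by omega
    simp [this]
    omega
  | succ d ih =>
    intro i s x1 y1 hd hs hn
    by_cases hlt : i < n
    · rw [pvGoA]
      simp only [hlt, dif_pos]
      by_cases hp : pvPix image py px i = 1
      · -- keep running
        have hre : pvRunEnd image py px n (i-1) = pvRunEnd image py px n i := by
          have e : i - 1 + 1 = i := by omega
          have hst := pvRunEnd_step image py px n (i-1) (by rw [e]; exact ⟨hlt, hp⟩)
          rw [e] at hst; exact hst
        have hstep : i - s + 1 = (i+1) - s := by omega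
        simp only [hp, if_pos, if_neg (by simp : ¬ (false = true)), hstep]
        rw [ih (i+1) s x1 y1 (by omega) (by omega) (by omega)]
        have : (i + 1) - 1 = i := by omega
        rw [this, hre]
      · -- run ends here
        have hstop : pvRunEnd image py px n (i-1) = i - 1 := by
          apply pvRunEnd_stop
          intro hc
          have : i - 1 + 1 = i := by omega
          rw [this] at hc
          exact hp hc.2
        simp only [hp, hstop]
        have h1 : i - 1 + 1 < n := by omega
        simp only [h1, if_pos]
        by_cases h2 : 2 ≤ i - s
        · have h3 : 1 ≤ i - 1 - s := by omega
          have h4 : Int.ofNat i - 1 = Int.ofNat (i - 1) := by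
            rw [Int.ofNat_eq_natCast, Int.ofNat_eq_natCast]; omega
          rw [if_pos h3, h4]
          simp [h2]
        · have h3 : ¬ 1 ≤ i - 1 - s := by omega
          have h4 : i - 1 + 2 = i + 1 := by omega
          simp [h2, h3, h4]
    · omega

-- the two loops agree from any "fresh" state (flag=True, index=0; x1,y1 are then dead variables)
theorem pvGoA_eq_pvGoB (image : List (List Int)) (py px : List Int) (n : Nat) :
    ∀ d i, d = n - i → i ≤ n → ∀ (x1 y1 : Int),
      pvGoA image py px n i true x1 y1 0 = pvGoB image py px n i := by
  intro d
  induction d using Nat.strong_induction_on with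
  | _ d ih =>
    intro i hd hn x1 y1
    by_cases hlt : i < n
    · rw [pvGoA, pvGoB]
      simp only [hlt, dif_pos]
      by_cases hp : pvPix image py px i = 1
      · -- a run starts at i
        have hm := pvGoA_mid image py px n (n - (i+1)) (i+1) i
          (PySem.List.pyGetD px (Int.ofNat i) 0) (PySem.List.pyGetD py (Int.ofNat i) 0)
          rfl (by omega) (by omega)
        have e1 : (i+1) - i = 1 := by omega
        have e2 : (i+1) - 1 = i := by omega
        rw [e1, e2] at hm
        simp only [hp, if_pos, ne_eq, not_true_eq_false, if_false, Nat.zero_add]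
        rw [hm]
        set j := pvRunEnd image py px n i with hj
        have hge : i ≤ j := pvRunEnd_ge image py px (n - i) i rfl
        by_cases hjn : j + 1 < n
        · by_cases hlen : 1 ≤ j - i
          · simp [hjn, hlen]
          · -- run of length 1: j = i
            have hji : j = i := by omega
            have hnext : ¬ pvPix image py px (i+1) = 1 := by
              intro hc
              have := pvRunEnd_step image py px n i ⟨by omega, hc⟩
              have := pvRunEnd_ge image py px (n - (i+1)) (i+1) rfl
              omega
            simp only [hjn, hlen, and_true, if_neg, if_pos, not_false_iff]
            rw [pvGoB]
            have hi1 : i + 1 < n := by omega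
            simp only [hji, hi1, dif_pos, ne_eq, hnext, not_false_iff, if_pos]
            have e3 : i + 1 + 1 = i + 2 := by omega
            rw [e3]
            exact ih (n - (i+2)) (by omega) (i+2) rfl (by omega) _ _
        · -- run reaches the end of the list
          simp only [hjn, and_false, if_neg, not_false_iff]
          rw [pvGoB]
          simp [show ¬ j + 1 < n from hjn]
      · -- background pixel: both loops step to i+1
        simp only [hp, if_neg, ne_eq, not_false_iff, if_pos]
        have h0 : ¬ (2:Nat) ≤ 0 := by omega
        simp only [h0, if_neg, not_false_iff]
        exact ih (n - (i+1)) (by omega) (i+1) rfl (by omega) x1 y1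
    · rw [pvGoA, pvGoB]
      simp [hlt]

-- ===== VERDICT (by name: the statement is the Claim_ definition above) =====
theorem alter_spilt_spec : Claim_equal_alter_spilt := by
  intro image py px _ _
  unfold Spec_alter_spilt alter_spilt alter_spilt_alt
  exact pvGoA_eq_pvGoB image py px px.length (px.length - 0) 0 rfl (by omega) 0 0
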